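-- pv_equiv track=rewrite | github.com/theonlypal/getswiftapi-void-eval | eval/common.py | parse_controls
-- ===== SOURCE A (Python) =====
-- def parse_controls(raw: str) -> list[tuple[str, str, str]]:
--     out: list[tuple[str, str, str]] = []
--     current_name = None
--     current_lines: list[str] = []
--
--     for line in raw.splitlines():
--         if line.startswith("[") and line.endswith("]"):
--             if current_name is not None:
--                 out.append(
--                     (
--                         current_name,
--                         "\n".join(current_lines).strip(),
--                         f"prompts/controls.txt[{current_name}]",
--                     )
--                 )
--             current_name = line[1:-1]
--             current_lines = []
--         else:
--             current_lines.append(line)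
--
--     if current_name is not None:
--         out.append(
--             (
--                 current_name,
--                 "\n".join(current_lines).strip(),
--                 f"prompts/controls.txt[{current_name}]",
--             )
--         )
--     return out
-- ===== SOURCE B (Python) =====
-- def parse_controls(raw: str) -> list[tuple[str, str, str]]:
--     lines = raw.splitlines()
--     heads = [(i, l) for i, l in enumerate(lines) if l.startswith("[") and l.endswith("]")]
--     ends = [i for i, _ in heads[1:]] + [len(lines)]
--     out: list[tuple[str, str, str]] = []
--     for (h, line), e in zip(heads, ends):
--         name = line[1:-1]
--         out.append((name, "\n".join(lines[h + 1:e]).strip(), f"prompts/controls.txt[{name}]"))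
--     return out
-- ===== Notes on version B (the rewrite author's own statement) =====
-- stated objective: alternative
-- what changed: B first builds the list of header positions via enumerate+filter and then emits each section by slicing the line list between consecutive header indices, replacing A's running accumulator with duplicated end-of-input flush.
import Mathlib
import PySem

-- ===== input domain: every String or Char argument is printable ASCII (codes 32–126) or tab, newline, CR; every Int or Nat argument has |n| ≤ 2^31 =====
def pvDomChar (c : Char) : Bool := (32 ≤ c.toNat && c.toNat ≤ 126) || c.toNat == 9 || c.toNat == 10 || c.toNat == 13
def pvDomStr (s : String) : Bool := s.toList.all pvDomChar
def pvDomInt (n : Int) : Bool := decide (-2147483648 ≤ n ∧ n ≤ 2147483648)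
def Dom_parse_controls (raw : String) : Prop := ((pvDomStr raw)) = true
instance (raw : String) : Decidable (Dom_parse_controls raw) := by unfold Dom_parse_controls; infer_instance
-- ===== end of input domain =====

-- B parses via header-index list + slicing instead of A's running accumulator; same O(n) cost (objective: alternative).

-- ===== PORT A =====
-- the duplicated "append the finished section" block of A
def pvFlushA (name? : Option String) (cur : List String) : List (String × String × String) :=
  match name? with
  | some n => [(n, PySem.Str.strip (PySem.Str.join "\n" cur), "prompts/controls.txt[" ++ n ++ "]")]
  | none => []

-- the loop body of A
def pvStepA (st : List (String × String × String) × Option String × List String)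
    (line : String) : List (String × String × String) × Option String × List String :=
  if PySem.Str.startswith line "[" && PySem.Str.endswith line "]" then
    (st.1 ++ pvFlushA st.2.1 st.2.2, some (PySem.Str.slice line (some 1) (some (-1))), ([] : List String))
  else
    (st.1, st.2.1, st.2.2 ++ [line])

def parse_controls (raw : String) : List (String × String × String) :=
  let fin := (PySem.Str.splitlines raw).foldl pvStepA ([], none, [])
  fin.1 ++ pvFlushA fin.2.1 fin.2.2

-- ===== PORT B =====
def parse_controls_alt (raw : String) : List (String × String × String) :=
  let lines := PySem.Str.splitlines raw
  let heads := (PySem.List.enumerate lines 0).filter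
    (fun p => PySem.Str.startswith p.2 "[" && PySem.Str.endswith p.2 "]")
  let ends := heads.tail.map (·.1) ++ [(lines.length : Int)]
  (heads.zip ends).map (fun pe =>
    let name := PySem.Str.slice pe.1.2 (some 1) (some (-1))
    (name,
     PySem.Str.strip (PySem.Str.join "\n" (PySem.List.slice lines (some (pe.1.1 + 1)) (some pe.2))),
     "prompts/controls.txt[" ++ name ++ "]"))

-- ===== PRECONDITION & SPEC =====
def Spec_parse_controls (raw : String) (out : List (String × String × String)) : Prop := out = parse_controls_alt raw
instance (raw : String) (out : List (String × String × String)) : Decidable (Spec_parse_controls raw out) := by unfold Spec_parse_controls; infer_instance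

-- ===== CLAIM (what is proved, stated in full; the proofs are below) =====
def Claim_equal_parse_controls : Prop := ∀ (raw : String), Dom_parse_controls raw → Spec_parse_controls raw (parse_controls raw)

-- ===== LEMMAS AND PROOFS =====

-- header test, name extraction, finished tuple (proof-side vocabulary)
def pvIsH (l : String) : Bool := PySem.Str.startswith l "[" && PySem.Str.endswith l "]"
def pvName (l : String) : String := PySem.Str.slice l (some 1) (some (-1))
def pvMk (n : String) (cs : List String) : String × String × String :=
  (n, PySem.Str.strip (PySem.Str.join "\n" cs), "prompts/controls.txt[" ++ n ++ "]")

-- the sections of a line list: (name, content lines) for each header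
def pvSections : List String → List (String × List String)
  | [] => []
  | l :: ls =>
    if pvIsH l then
      (pvName l, ls.takeWhile (fun x => !pvIsH x)) :: pvSections (ls.dropWhile (fun x => !pvIsH x))
    else pvSections ls
termination_by ls => ls.length
decreasing_by
  · have := List.length_dropWhile_le (fun x => !pvIsH x) ls; simp; omega
  · simp

def pvG (lines : List String) : List (String × String × String) :=
  (pvSections lines).map (fun p => pvMk p.1 p.2)

-- Nat-indexed header list
def pvShift (p : Nat × String) : Nat × String := (p.1 + 1, p.2)
def pvHN : List String → List (Nat × String)
  | [] => []
  | l :: ls => (if pvIsH l then [(0, l)] else []) ++ (pvHN ls).map pvShift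

-- Nat-level core of B
def pvFB (lines : List String) (pe : (Nat × String) × Nat) : String × String × String :=
  pvMk (pvName pe.1.2) ((lines.drop (pe.1.1 + 1)).take (pe.2 - (pe.1.1 + 1)))
def pvBN (lines : List String) (hs : List (Nat × String)) : List (String × String × String) :=
  (hs.zip (hs.tail.map (·.1) ++ [lines.length])).map (pvFB lines)

set_option maxHeartbeats 1000000 in
theorem pvHeads_eq (ls : List String) (s : Int) :
    (PySem.List.enumerate ls s).filter (fun p => PySem.Str.startswith p.2 "[" && PySem.Str.endswith p.2 "]")
      = (pvHN ls).map (fun p => (s + (p.1 : Int), p.2)) := by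
  induction ls generalizing s with
  | nil => simp [PySem.List.enumerate_nil, pvHN]
  | cons l ls ih =>
    rw [PySem.List.enumerate_cons, List.filter_cons]
    by_cases h : pvIsH l
    · rw [if_pos (by exact h), ih (s + 1)]
      simp only [pvHN, h, if_pos, List.singleton_append, List.map_cons, List.map_map]
      refine congrArg₂ _ (by simp) ?_
      apply List.map_congr_left
      intro p _
      simp only [Function.comp, pvShift]
      refine Prod.ext ?_ rfl
      push_cast; ring
    · rw [if_neg (by simpa [pvIsH] using h), ih (s + 1)]
      simp only [pvHN, h, if_neg, Bool.false_eq_true, not_false_iff, List.nil_append, List.map_map]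
      apply List.map_congr_left
      intro p _
      simp only [Function.comp, pvShift]
      refine Prod.ext ?_ rfl
      push_cast; ring

theorem pvBN_shift (l : String) (ls : List String) (hs : List (Nat × String)) :
    pvBN (l :: ls) (hs.map pvShift) = pvBN ls hs := by
  unfold pvBN
  have h1 : (hs.map pvShift).tail.map (·.1) ++ [(l :: ls).length]
      = (hs.tail.map (·.1) ++ [ls.length]).map (· + 1) := by
    cases hs <;> simp [pvShift, List.map_map, Function.comp_def]
  rw [h1, List.zip_map, List.map_map]
  apply List.map_congr_left
  intro pe _
  obtain ⟨⟨h, x⟩, e⟩ := pe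
  simp [pvFB, pvShift, Prod.map, Nat.succ_sub_succ]

theorem pvSections_dropWhile (ls : List String) :
    pvSections (ls.dropWhile (fun x => !pvIsH x)) = pvSections ls := by
  induction ls with
  | nil => simp
  | cons l ls ih =>
    by_cases h : pvIsH l
    · simp [List.dropWhile_cons, h]
    · rw [List.dropWhile_cons]
      simp only [h, Bool.not_false, if_pos]
      rw [ih]
      simp [pvSections, h]

theorem pvHN_nil_take (ls : List String) (h : pvHN ls = []) :
    ls.takeWhile (fun x => !pvIsH x) = ls ∧ ls.dropWhile (fun x => !pvIsH x) = [] := by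
  induction ls with
  | nil => simp
  | cons l ls ih =>
    by_cases hl : pvIsH l
    · simp [pvHN, hl] at h
    · simp [pvHN, hl] at h
      have := ih h
      simp [List.takeWhile_cons, List.dropWhile_cons, hl, this.1, this.2]

theorem pvHN_cons_take (ls : List String) (h1 : Nat) (x : String) (t : List (Nat × String))
    (h : pvHN ls = (h1, x) :: t) :
    ls.takeWhile (fun x => !pvIsH x) = ls.take h1 := by
  induction ls generalizing h1 t with
  | nil => simp [pvHN] at h
  | cons l ls ih =>
    by_cases hl : pvIsH l
    · simp [pvHN, hl] at h
      simp [List.takeWhile_cons, hl, h.1.1]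
    · simp [pvHN, hl] at h
      cases hhn : pvHN ls with
      | nil => rw [hhn] at h; simp at h
      | cons p t' =>
        obtain ⟨ph, px⟩ := p
        rw [hhn] at h
        simp [pvShift] at h
        obtain ⟨⟨hh, hx⟩, ht⟩ := h
        subst hx
        have := ih ph t' hhn
        simp [List.takeWhile_cons, hl, this, ← hh]

theorem pvSections_nil : pvSections [] = [] := by simp [pvSections]
theorem pvSections_cons (l : String) (ls : List String) :
    pvSections (l :: ls)
      = if pvIsH l then
          (pvName l, ls.takeWhile (fun x => !pvIsH x)) :: pvSections (ls.dropWhile (fun x => !pvIsH x))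
        else pvSections ls := by
  simp [pvSections]

set_option maxHeartbeats 1000000 in
theorem pvBN_eq_g (lines : List String) : pvBN lines (pvHN lines) = pvG lines := by
  induction lines with
  | nil => simp [pvBN, pvHN, pvG, pvSections_nil]
  | cons l ls ih =>
    by_cases hl : pvIsH l
    · simp only [pvHN, hl, if_pos, List.singleton_append]
      cases hhn : pvHN ls with
      | nil =>
        have hno := pvHN_nil_take ls hhn
        simp only [hhn, List.map_nil]
        simp [pvBN, pvFB, pvG, pvSections_cons, pvSections_nil, hl, hno.1, hno.2, pvName]
      | cons p t =>
        obtain ⟨h1, x⟩ := p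
        have htk := pvHN_cons_take ls h1 x t hhn
        have hzip : pvBN (l :: ls) ((0, l) :: ((h1, x) :: t).map pvShift)
            = pvFB (l :: ls) ((0, l), h1 + 1) :: pvBN (l :: ls) (((h1, x) :: t).map pvShift) := by
          simp [pvBN, pvShift, List.zip_cons_cons, List.cons_append]
        rw [hzip, pvBN_shift, ← hhn, ih]
        have hg : pvG (l :: ls)
            = pvMk (pvName l) (ls.takeWhile (fun x => !pvIsH x))
                :: pvG (ls.dropWhile (fun x => !pvIsH x)) := by
          simp [pvG, pvSections_cons, hl]
        have hgd : pvG (ls.dropWhile (fun x => !pvIsH x)) = pvG ls := by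
          unfold pvG; rw [pvSections_dropWhile]
        rw [hg, hgd]
        exact congrArg (fun z => z :: pvG ls) (by simp [pvFB, pvName, htk])
    · simp only [pvHN, hl, Bool.false_eq_true, if_false, List.nil_append]
      rw [pvBN_shift, ih]
      simp [pvG, pvSections_cons, hl]

-- A-side: characterise the fold
def pvFin (st : List (String × String × String) × Option String × List String) :
    List (String × String × String) := st.1 ++ pvFlushA st.2.1 st.2.2

theorem pvA1 (lines : List String) (out : List (String × String × String)) (n : String)
    (cur : List String) :
    pvFin (lines.foldl pvStepA (out, some n, cur))
      = out ++ pvMk n (cur ++ lines.takeWhile (fun x => !pvIsH x))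
          :: pvG (lines.dropWhile (fun x => !pvIsH x)) := by
  induction lines generalizing out n cur with
  | nil => simp [pvFin, pvFlushA, pvMk, pvG, pvSections_nil]
  | cons l ls ih =>
    by_cases hl : pvIsH l
    · have hb : (PySem.Str.startswith l "[" && PySem.Str.endswith l "]") = true := hl
      rw [List.foldl_cons]
      simp only [pvStepA, hb, if_pos]
      rw [ih]
      simp [pvFlushA, pvMk, List.takeWhile_cons, List.dropWhile_cons, hl, pvG, pvSections_cons, pvName]
    · have hb : (PySem.Str.startswith l "[" && PySem.Str.endswith l "]") = false := by
        simpa [pvIsH] using hl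
      rw [List.foldl_cons]
      simp only [pvStepA, hb, Bool.false_eq_true, if_neg, not_false_iff]
      rw [ih]
      simp [List.takeWhile_cons, List.dropWhile_cons, hl]

theorem pvA0 (lines : List String) (out : List (String × String × String)) (cur : List String) :
    pvFin (lines.foldl pvStepA (out, none, cur)) = out ++ pvG lines := by
  induction lines generalizing out cur with
  | nil => simp [pvFin, pvFlushA, pvG, pvSections_nil]
  | cons l ls ih =>
    by_cases hl : pvIsH l
    · have hb : (PySem.Str.startswith l "[" && PySem.Str.endswith l "]") = true := hl
      rw [List.foldl_cons]
      simp only [pvStepA, hb, if_pos]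
      rw [pvA1]
      simp [pvFlushA, pvG, pvSections_cons, hl, pvName]
    · have hb : (PySem.Str.startswith l "[" && PySem.Str.endswith l "]") = false := by
        simpa [pvIsH] using hl
      rw [List.foldl_cons]
      simp only [pvStepA, hb, Bool.false_eq_true, if_neg, not_false_iff]
      rw [ih]
      simp [pvG, pvSections_cons, hl]

theorem pvAlt_eq_BN (raw : String) :
    parse_controls_alt raw = pvBN (PySem.Str.splitlines raw) (pvHN (PySem.Str.splitlines raw)) := by
  unfold parse_controls_alt
  dsimp only
  set lines := PySem.Str.splitlines raw with hlines
  rw [pvHeads_eq lines 0]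
  simp only [zero_add]
  have hends : ((pvHN lines).map (fun p => ((p.1 : Int), p.2))).tail.map (·.1) ++ [(lines.length : Int)]
      = ((pvHN lines).tail.map (·.1) ++ [lines.length]).map (fun n : Nat => (n : Int)) := by
    simp only [List.map_tail, List.map_map, List.map_append]
    rfl
  rw [hends, List.zip_map, List.map_map]
  unfold pvBN
  apply List.map_congr_left
  intro pe _
  obtain ⟨⟨h, x⟩, e⟩ := pe
  simp only [Function.comp, Prod.map, pvFB, pvMk, pvName]
  have : ((h : Int) + 1) = ((h + 1 : Nat) : Int) := by push_cast; ring
  rw [this, PySem.List.slice_natCast]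

-- ===== VERDICT (by name: the statement is the Claim_ definition above) =====
theorem parse_controls_spec : Claim_equal_parse_controls := by
  intro raw _
  unfold Spec_parse_controls parse_controls
  rw [pvAlt_eq_BN, pvBN_eq_g]
  simpa [pvFin] using pvA0 (PySem.Str.splitlines raw) [] []
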